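-- pv_equiv track=rewrite | github.com/rohithaug/wordle-bot | wordle_bot/player/strategy2.py | non_duplicate
-- ===== SOURCE A (Python) =====
-- def non_duplicate(words: str, indexes: int) -> str:
--     """
--     Prioritizes words based on the number of duplicates in the given indexes of each word.
--     """
--     # Count the number of duplicates for each word
--     num_duplicates = []
--     for word in words:
--         duplicates = set()
--         for i in indexes:
--             letter = word[i]
--             if letter in duplicates:
--                 continue
--             duplicates.add(letter)
--         num_duplicates.append(len(duplicates))
--
--     # Sort the words based on the number of duplicates
--     grouped_words = [[] for _ in range(len(words[0]) + 1)]
--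
--     for i, word in enumerate(words):
--         grouped_words[num_duplicates[i]].append(word)
--
--     return grouped_words[::-1]
-- ===== SOURCE B (Python) =====
-- def non_duplicate(words: str, indexes: int) -> str:
--     """
--     Prioritizes words based on the number of duplicates in the given indexes of each word.
--     """
--     counts = [len({word[i] for i in indexes}) for word in words]
--     n = len(words[0])
--     return [[w for w, c in zip(words, counts) if c == k] for k in reversed(range(n + 1))]
-- ===== Notes on version B (the rewrite author's own statement) =====
-- stated objective: alternative
-- what changed: A scatter-appends each word into a mutable bucket list indexed by its distinct-letter count and reverses; B computes the counts once and builds the reversed result directly by filtering the word list per count k = n..0.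
import Mathlib
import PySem

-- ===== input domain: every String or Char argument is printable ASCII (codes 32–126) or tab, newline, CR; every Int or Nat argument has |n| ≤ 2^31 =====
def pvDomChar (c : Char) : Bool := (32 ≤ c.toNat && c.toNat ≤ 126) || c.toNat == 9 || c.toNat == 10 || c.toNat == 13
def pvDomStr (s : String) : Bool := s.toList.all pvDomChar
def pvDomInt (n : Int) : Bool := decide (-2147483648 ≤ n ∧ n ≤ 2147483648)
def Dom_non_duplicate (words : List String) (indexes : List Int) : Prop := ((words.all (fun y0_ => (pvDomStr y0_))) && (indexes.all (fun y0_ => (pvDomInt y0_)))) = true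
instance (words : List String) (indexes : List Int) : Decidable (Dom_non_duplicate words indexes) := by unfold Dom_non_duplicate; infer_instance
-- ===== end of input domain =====

-- B replaces A's scatter-append into indexed buckets by computing each word's distinct-letter
-- count once and gathering each bucket with a per-count filter (objective: alternative, same cost).


-- ===== PORT A =====
def non_duplicate (words : List String) (indexes : List Int) : List (List String) :=
  -- num_duplicates loop: a set built letter by letter with an explicit membership test
  let num_duplicates : List Nat := words.foldl (fun acc word =>
    let duplicates := indexes.foldl (fun s i =>
      let letter := PySem.List.pyGetD word.toList i ' '   -- word[i] (IndexError outside Pre_)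
      if PySem.Set.contains s letter then s else PySem.Set.add s letter) (PySem.Set.empty)
    acc ++ [duplicates.length]) []
  let n := (PySem.List.pyGetD words 0 "").toList.length   -- len(words[0]) (IndexError on [] — outside Pre_)
  let grouped₀ : List (List String) := List.replicate (n + 1) []
  let grouped := (PySem.List.enumerate words 0).foldl (fun b p =>
    let nd := PySem.List.pyGetD num_duplicates p.1 0
    -- grouped_words[nd].append(word); nd > n raises IndexError — outside Pre_
    PySem.List.pySetD b (nd : Int) (PySem.List.pyGetD b (nd : Int) [] ++ [p.2])) grouped₀
  grouped.reverse   -- grouped_words[::-1] is reverse (PySem.List.slice?_none_none_neg_one)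

-- ===== PORT B =====
def non_duplicate_alt (words : List String) (indexes : List Int) : List (List String) :=
  let counts : List Nat := words.map (fun word =>
    (PySem.Set.ofList (indexes.map (fun i => PySem.List.pyGetD word.toList i ' '))).length)
  let n := (PySem.List.pyGetD words 0 "").toList.length
  (List.range (n + 1)).reverse.map (fun k =>
    ((words.zip counts).filter (fun p => p.2 == k)).map (·.1))

-- ===== PRECONDITION & SPEC =====
-- Pre_ excludes exactly the inputs where Python A raises IndexError: empty words (words[0]),
-- an index out of range for some word (word[i]), or a word with more distinct letters at the
-- indexes than len(words[0]) (its bucket index is past the end of grouped_words).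
def Pre_non_duplicate (words : List String) (indexes : List Int) : Prop :=
  words ≠ [] ∧
  (∀ w ∈ words, ∀ i ∈ indexes, PySem.Raise.InRange w.toList.length i) ∧
  (∀ w ∈ words,
    (PySem.Set.ofList (indexes.map (fun i => PySem.List.pyGetD w.toList i ' '))).length
      ≤ (words.headD "").toList.length)
instance (words : List String) (indexes : List Int) : Decidable (Pre_non_duplicate words indexes) := by
  unfold Pre_non_duplicate; infer_instance
def pvWitness_non_duplicate : List String × List Int := (["ab", "ba", "aa"], [0, 1])

def Spec_non_duplicate (words : List String) (indexes : List Int) (out : List (List String)) : Prop := out = non_duplicate_alt words indexes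
instance (words : List String) (indexes : List Int) (out : List (List String)) : Decidable (Spec_non_duplicate words indexes out) := by unfold Spec_non_duplicate; infer_instance

-- ===== CLAIM (what is proved, stated in full; the proofs are below) =====
def Claim_equal_non_duplicate : Prop := ∀ (words : List String) (indexes : List Int), Dom_non_duplicate words indexes → Pre_non_duplicate words indexes → Spec_non_duplicate words indexes (non_duplicate words indexes)

-- ===== LEMMAS AND PROOFS =====

-- A's guarded insertion is exactly Set.add
theorem pv_if_contains_add {α : Type} [BEq α] (s : PySem.Set α) (c : α) :
    (if PySem.Set.contains s c then s else PySem.Set.add s c) = PySem.Set.add s c := by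
  simp only [PySem.Set.add]
  by_cases h : PySem.Set.contains s c
  · simp [h]
  · simp [h]

-- A's inner loop builds set(map g indexes)
theorem pv_inner_count (indexes : List Int) (g : Int → Char) (s : PySem.Set Char) :
    indexes.foldl (fun s i =>
      let letter := g i
      if PySem.Set.contains s letter then s else PySem.Set.add s letter) s
      = List.foldl PySem.Set.add s (indexes.map g) := by
  simp only [pv_if_contains_add]
  rw [List.foldl_map]

-- updating one cell of a tabulated list re-tabulates it
theorem pv_set_map_range (m c : Nat) (_hc : c < m) (g : Nat → List String) (v : List String) :
    ((List.range m).map g).set c v = (List.range m).map (fun k => if k = c then v else g k) := by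
  apply List.ext_getElem
  · simp
  · intro i h1 h2
    simp only [List.getElem_set, List.getElem_map, List.getElem_range]
    by_cases h : c = i
    · simp [h]
    · simp only [if_neg h, if_neg (fun hh : i = c => h hh.symm)]

theorem pv_getD_map_range (m c : Nat) (hc : c < m) (g : Nat → List String) :
    ((List.range m).map g).getD c [] = g c := by
  simp [List.getD, hc]

-- the distinct-letter count of a word, as B computes it (proof-side abbreviation only)
def fcount (indexes : List Int) (w : String) : Nat :=
  (PySem.Set.ofList (indexes.map (fun i => PySem.List.pyGetD w.toList i ' '))).length

-- scattering (word, count) pairs into tabulated buckets = per-bucket filtering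
theorem pv_scatter (ps : List (String × Nat)) (m : Nat) (g : Nat → List String)
    (h : ∀ p ∈ ps, p.2 < m) :
    ps.foldl (fun b p =>
        PySem.List.pySetD b (p.2 : Int) (PySem.List.pyGetD b (p.2 : Int) [] ++ [p.1]))
      ((List.range m).map g)
    = (List.range m).map (fun k => g k ++ (ps.filter (fun q => q.2 == k)).map (·.1)) := by
  induction ps generalizing g with
  | nil => simp
  | cons p t ih =>
    obtain ⟨w, c⟩ := p
    have hc : c < m := h (w, c) List.mem_cons_self
    simp only [List.foldl_cons]
    rw [PySem.List.pySetD_natCast, PySem.List.pyGetD_natCast, pv_getD_map_range m c hc,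
        pv_set_map_range m c hc, ih _ (fun q hq => h q (List.mem_cons_of_mem _ hq))]
    apply List.map_congr_left
    intro k hk
    simp only [List.filter_cons]
    by_cases hkc : c = k
    · subst hkc
      simp
    · have hbe : ¬ ((c == k) = true) := by simp [hkc]
      simp [hbe]
      intro hh; exact absurd hh.symm hkc

-- A's enumerate loop, indexing the counts list, is the zip loop
theorem pv_enum_fold (full : List Nat) (f : String → Nat) (ws : List String) (s : Nat)
    (h : ∀ j, (hj : j < ws.length) → full.getD (s + j) 0 = f ws[j]) (B : List (List String)) :
    (PySem.List.enumerate ws (s : Int)).foldl (fun b p =>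
        let nd := PySem.List.pyGetD full p.1 0
        PySem.List.pySetD b (nd : Int) (PySem.List.pyGetD b (nd : Int) [] ++ [p.2])) B
    = (ws.zip (ws.map f)).foldl (fun b p =>
        PySem.List.pySetD b (p.2 : Int) (PySem.List.pyGetD b (p.2 : Int) [] ++ [p.1])) B := by
  induction ws generalizing s B with
  | nil => simp [PySem.List.enumerate]
  | cons w t ih =>
    simp only [PySem.List.enumerate, List.map_cons, List.zip_cons_cons, List.foldl_cons]
    have h0 : PySem.List.pyGetD full (s : Int) 0 = f w := by
      rw [PySem.List.pyGetD_natCast]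
      simpa using h 0 (by simp)
    rw [h0]
    have hcast : ((s : Int) + 1) = ((s + 1 : Nat) : Int) := by push_cast; ring
    rw [hcast, ih (s + 1) (fun j hj => by
      simpa [Nat.add_assoc, Nat.add_comm 1 j] using h (j+1) (by simpa using hj))]

theorem pv_main (words : List String) (indexes : List Int)
    (hne : words ≠ [])
    (hb : ∀ w ∈ words, fcount indexes w ≤ (words.headD "").toList.length) :
    non_duplicate words indexes = non_duplicate_alt words indexes := by
  unfold non_duplicate non_duplicate_alt
  simp only
  have hnum : words.foldl (fun acc word =>
      let duplicates := indexes.foldl (fun s i =>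
        let letter := PySem.List.pyGetD word.toList i ' '
        if PySem.Set.contains s letter then s else PySem.Set.add s letter) (PySem.Set.empty)
      acc ++ [duplicates.length]) [] = words.map (fcount indexes) := by
    have hgen : ∀ (acc : List Nat), words.foldl (fun acc word =>
        let duplicates := indexes.foldl (fun s i =>
          let letter := PySem.List.pyGetD word.toList i ' '
          if PySem.Set.contains s letter then s else PySem.Set.add s letter) (PySem.Set.empty)
        acc ++ [duplicates.length]) acc = acc ++ words.map (fcount indexes) := by
      intro acc
      have := PySem.List.foldl_append_singleton_eq_map (fun word =>
        (indexes.foldl (fun s i =>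
          let letter := PySem.List.pyGetD word.toList i ' '
          if PySem.Set.contains s letter then s else PySem.Set.add s letter)
          (PySem.Set.empty)).length) words acc
      rw [this]
      congr 1
      apply List.map_congr_left
      intro w _
      simp only [pv_inner_count]
      rw [fcount, PySem.Set.ofList_eq_foldl]
      rfl
    simpa using hgen []
  rw [hnum]
  set n := (PySem.List.pyGetD words 0 "").toList.length with hn
  have hrep : (List.replicate (n + 1) ([] : List String)) = (List.range (n+1)).map (fun _ => []) := by
    simp [List.map_const']
  rw [hrep]
  have henum := pv_enum_fold (words.map (fcount indexes)) (fcount indexes) words 0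
    (fun j hj => by simp [List.getD, hj]) ((List.range (n+1)).map (fun _ => []))
  rw [show ((0 : Int)) = ((0 : Nat) : Int) from by norm_num, henum]
  have hbound : ∀ p ∈ words.zip (words.map (fcount indexes)), p.2 < n + 1 := by
    intro p hp
    have h2 := (List.of_mem_zip hp).2
    obtain ⟨w, hw, hfw⟩ := List.mem_map.mp h2
    have hble := hb w hw
    have hhead : (words.headD "") = PySem.List.pyGetD words 0 "" := by
      cases words with
      | nil => exact absurd rfl hne
      | cons a t => simp [PySem.List.pyGetD_zero_cons]
    rw [← hfw]
    rw [hhead] at hble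
    omega
  rw [pv_scatter _ _ _ hbound]
  rw [List.map_reverse]
  simp only [List.nil_append]
  rfl

-- ===== VERDICT (by name: the statement is the Claim_ definition above) =====
theorem non_duplicate_spec : Claim_equal_non_duplicate := by
  intro words indexes _ hpre
  unfold Spec_non_duplicate
  exact pv_main words indexes hpre.1 hpre.2.2
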